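-- pv_equiv track=rewrite | github.com/WoutDeleu/ExcelFormulaExtractor | ExcelHandler/excel_helpers.py | split_up_conditions
-- ===== SOURCE A (Python) =====
-- def split_up_conditions(condition):
--     # Lijst met operatoren en hun bijbehorende patronen
--     operators = {
--         '>': '>',
--         '<': '<',
--         '=': '=',
--         '>=': '>=',
--         '<=': '<=',
--         '<>': '<>'
--     }
--
--     parts = []
--     used_operators = []
--     current_part = ''
--     i=0
--     while i < len(condition):
--         if condition[i:i+2] in operators:
--             parts.append(current_part)
--             if condition[i:i+2] == '<>':
--                 used_operators.append('!=')
--             else: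
--                 used_operators.append(condition[i:i+2])
--             current_part = ''
--             i += 1
--         elif condition[i] in operators:
--             parts.append(current_part)
--             if condition[i] == '=':
--                 used_operators.append('==')
--             else:
--                 used_operators.append(condition[i])
--             current_part = ''
--         else:
--             current_part += condition[i]
--         i += 1
--     parts.append(current_part)
--     return parts, used_operators
-- ===== SOURCE B (Python) =====
-- def split_up_conditions(condition):
--     # One-pass character automaton with a one-character "pending" state for a
--     # possible two-char operator, instead of index arithmetic with slices.
--     parts, used_operators, current_part, pending = [], [], '', ''
--     for ch in condition:
--         if pending:
--             two = pending + ch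
--             if two in ('>=', '<=', '<>'):
--                 used_operators.append('!=' if two == '<>' else two)
--                 pending = ''
--                 continue
--             used_operators.append(pending)
--             pending = ''
--         if ch in '<>':
--             parts.append(current_part)
--             current_part = ''
--             pending = ch
--         elif ch == '=':
--             parts.append(current_part)
--             current_part = ''
--             used_operators.append('==')
--         else:
--             current_part += ch
--     if pending:
--         used_operators.append(pending)
--     parts.append(current_part)
--     return parts, used_operators
-- ===== Notes on version B (the rewrite author's own statement) =====
-- stated objective: faster
-- what changed: Replaced the index/slice scan (condition[i:i+2] membership in an operator dict, manual i bookkeeping, quadratic repeated string concatenation in practice) by a single for-loop character automaton that carries a one-character pending state for possible two-char operators and translates operators uniformly.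
-- intended difference: On strings whose final character is a lone '=' token (ends with '=' and the '=' is not the second char of '>=' or '<='), A's end-of-string slice branch appends the untranslated operator '=' while B appends '==' as it does for every other standalone '='; '==' is the intended translation. — e.g. on split_up_conditions("a="): A returns (["a", ""], ["="]), B returns (["a", ""], ["=="])
import Mathlib
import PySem

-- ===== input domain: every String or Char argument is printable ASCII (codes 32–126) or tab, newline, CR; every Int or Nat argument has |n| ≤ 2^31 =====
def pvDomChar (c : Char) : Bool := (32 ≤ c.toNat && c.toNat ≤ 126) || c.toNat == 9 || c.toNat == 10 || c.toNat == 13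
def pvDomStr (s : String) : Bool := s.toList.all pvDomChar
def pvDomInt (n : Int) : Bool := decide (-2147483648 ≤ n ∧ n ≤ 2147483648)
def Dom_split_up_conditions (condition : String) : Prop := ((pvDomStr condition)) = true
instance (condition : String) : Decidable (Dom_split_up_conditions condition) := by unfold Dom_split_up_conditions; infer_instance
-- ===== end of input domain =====

-- B replaces A's index/slice scan by a one-pass character automaton with a pending-operator
-- state (objective: alternative structure, same O(n) cost); on strings ending in a lone '='
-- token A returns the untranslated '=' where B returns the intended '==' (see D_ below).

-- ===== PORT A =====
-- the keys of A's `operators` dict, as char lists (Python compares the slice against them)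
def pvOpKeys : List (List Char) := [['>'], ['<'], ['='], ['>', '='], ['<', '='], ['<', '>']]

-- A's `while i < len(condition)` loop; `condition[i:i+2]` is (cs.drop i).take 2,
-- `condition[i]` is cs[i]; the `<>`-branch's `i += 1` plus the shared `i += 1` is `i + 2`.
def pvLoopA (cs : List Char) (i : Nat) (parts ops : List String) (cur : String) :
    List String × List String :=
  if h : i < cs.length then
    if pvOpKeys.contains ((cs.drop i).take 2) then
      pvLoopA cs (i + 2) (parts ++ [cur])
        (ops ++ [if (cs.drop i).take 2 = ['<', '>'] then "!=" else String.mk ((cs.drop i).take 2)]) ""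
    else if pvOpKeys.contains [cs[i]] then
      pvLoopA cs (i + 1) (parts ++ [cur])
        (ops ++ [if cs[i] = '=' then "==" else String.mk [cs[i]]]) ""
    else
      pvLoopA cs (i + 1) parts ops (cur.push cs[i])
  else (parts ++ [cur], ops)
termination_by cs.length - i

def split_up_conditions (condition : String) : List String × List String :=
  pvLoopA condition.toList 0 [] [] ""

-- ===== PORT B =====
-- B's loop body for a character when no two-char operator is pending
def pvHandleB (parts ops : List String) (cur : String) (ch : Char) :
    List String × List String × String × Option Char :=
  if ch = '<' ∨ ch = '>' then (parts ++ [cur], ops, "", some ch)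
  else if ch = '=' then (parts ++ [cur], ops ++ ["=="], "", none)
  else (parts, ops, cur.push ch, none)

-- B's full loop body: first resolve a pending '<'/'>' against the current character
def pvStepB (st : List String × List String × String × Option Char) (ch : Char) :
    List String × List String × String × Option Char :=
  match st with
  | (parts, ops, cur, some p) =>
    let two := [p, ch]
    if two = ['>', '='] ∨ two = ['<', '='] ∨ two = ['<', '>'] then
      (parts, ops ++ [if two = ['<', '>'] then "!=" else String.mk two], cur, none)
    else
      pvHandleB parts (ops ++ [String.mk [p]]) cur ch
  | (parts, ops, cur, none) => pvHandleB parts ops cur ch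

-- B's epilogue: `if pending: ops.append(pending)` then `parts.append(current_part)`
def pvFinishB : List String × List String × String × Option Char → List String × List String
  | (parts, ops, cur, some p) => (parts ++ [cur], ops ++ [String.mk [p]])
  | (parts, ops, cur, none) => (parts ++ [cur], ops)

def split_up_conditions_alt (condition : String) : List String × List String :=
  pvFinishB (condition.toList.foldl pvStepB ([], [], "", none))

-- ===== PRECONDITION & SPEC =====
-- D_ inspects only the last three characters: the string ends in a lone '=' token, i.e. a final
-- '=' that is not the second character of a '>=' or '<=' operator occurrence.
def pvD : List Char → Bool
  | [] => false
  | [c] => c = '='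
  | [b, c] => c = '=' && !(b = '<' || b = '>')
  | [a, b, c] => c = '=' && (if b = '<' then false else if b = '>' then a = '<' else true)
  | _ :: b :: c :: d :: rest => pvD (b :: c :: d :: rest)

-- On strings ending in a lone '=' token A appends the untranslated operator '=' (its
-- end-of-string slice branch skips the '=' → '==' translation) while B appends '==' as for
-- every other standalone '='; '==' is the intended translation.
def D_split_up_conditions (condition : String) : Prop := pvD condition.toList = true
instance (condition : String) : Decidable (D_split_up_conditions condition) := by
  unfold D_split_up_conditions; infer_instance

def Spec_split_up_conditions (condition : String) (out : List String × List String) : Prop :=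
  ¬ D_split_up_conditions condition → out = split_up_conditions_alt condition
instance (condition : String) (out : List String × List String) :
    Decidable (Spec_split_up_conditions condition out) := by
  unfold Spec_split_up_conditions; infer_instance

def pvDiffWitness_split_up_conditions : String := "a="
def pvDiffWitnessOut_split_up_conditions :
    (List String × List String) × (List String × List String) :=
  ((["a", ""], ["="]), (["a", ""], ["=="]))

-- ===== CLAIM (what is proved, stated in full; the proofs are below) =====
def Claim_unchanged_split_up_conditions : Prop := ∀ (condition : String), Dom_split_up_conditions condition → Spec_split_up_conditions condition (split_up_conditions condition)
def Claim_changed_split_up_conditions : Prop := Dom_split_up_conditions (pvDiffWitness_split_up_conditions) ∧ D_split_up_conditions (pvDiffWitness_split_up_conditions) ∧ split_up_conditions (pvDiffWitness_split_up_conditions) = pvDiffWitnessOut_split_up_conditions.1 ∧ split_up_conditions_alt (pvDiffWitness_split_up_conditions) = pvDiffWitnessOut_split_up_conditions.2 ∧ pvDiffWitnessOut_split_up_conditions.1 ≠ pvDiffWitnessOut_split_up_conditions.2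

-- ===== LEMMAS AND PROOFS =====

-- A's index loop, re-expressed as structural recursion on the remaining suffix of the input
def pvScanA : List Char → List String → List String → String → List String × List String
  | [], parts, ops, cur => (parts ++ [cur], ops)
  | [c], parts, ops, cur =>
    -- last character: the slice is the one-char string [c]; after the operator branch the
    -- loop ends (i skips past the end) and appends the empty current part
    if pvOpKeys.contains [c] then
      (parts ++ [cur] ++ [""],
       ops ++ [if ([c] : List Char) = ['<', '>'] then "!=" else String.mk [c]])
    else (parts ++ [cur.push c], ops)
  | c :: r :: rest, parts, ops, cur =>
    if pvOpKeys.contains [c, r] then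
      pvScanA rest (parts ++ [cur])
        (ops ++ [if ([c, r] : List Char) = ['<', '>'] then "!=" else String.mk [c, r]]) ""
    else if pvOpKeys.contains [c] then
      pvScanA (r :: rest) (parts ++ [cur])
        (ops ++ [if c = '=' then "==" else String.mk [c]]) ""
    else
      pvScanA (r :: rest) parts ops (cur.push c)

theorem pvLoopA_eq_scan (cs : List Char) (i : Nat) (parts ops : List String) (cur : String) :
    pvLoopA cs i parts ops cur = pvScanA (cs.drop i) parts ops cur := by
  induction i, parts, ops, cur using pvLoopA.induct cs with
  | case1 i parts ops cur h h2 ih =>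
    rw [pvLoopA, dif_pos h]
    have hdrop : cs.drop i = cs[i] :: cs.drop (i+1) := List.drop_eq_getElem_cons h
    simp only [dite_eq_ite] at ih
    rcases hrest : cs.drop (i+1) with _ | ⟨r, rest⟩
    · have hd2 : cs.drop (i+2) = [] := by
        have h1 : List.drop 1 (List.drop (i+1) cs) = [] := by rw [hrest]; rfl
        rwa [List.drop_drop] at h1
      have ht : (cs.drop i).take 2 = [cs[i]] := by rw [hdrop, hrest]; rfl
      rw [ht] at h2 ih ⊢
      rw [if_pos h2, ih, hd2, hdrop, hrest, pvScanA, pvScanA, if_pos h2]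
    · have hd2 : cs.drop (i+2) = rest := by
        have h1 : List.drop 1 (List.drop (i+1) cs) = rest := by rw [hrest]; rfl
        rwa [List.drop_drop] at h1
      have ht : (cs.drop i).take 2 = [cs[i], r] := by rw [hdrop, hrest]; rfl
      rw [ht] at h2 ih ⊢
      rw [if_pos h2, ih, hd2, hdrop, hrest, pvScanA, if_pos h2]
  | case2 i parts ops cur h h2 h3 ih =>
    rw [pvLoopA, dif_pos h]
    have hdrop : cs.drop i = cs[i] :: cs.drop (i+1) := List.drop_eq_getElem_cons h
    simp only [dite_eq_ite] at ih
    rcases hrest : cs.drop (i+1) with _ | ⟨r, rest⟩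
    · exfalso
      have ht : (cs.drop i).take 2 = [cs[i]] := by rw [hdrop, hrest]; rfl
      rw [ht] at h2
      exact h2 h3
    · have ht : (cs.drop i).take 2 = [cs[i], r] := by rw [hdrop, hrest]; rfl
      rw [ht] at h2 ⊢
      rw [if_neg h2, if_pos h3, ih, hrest, hdrop, hrest, pvScanA, if_neg h2, if_pos h3]
  | case3 i parts ops cur h h2 h3 ih =>
    rw [pvLoopA, dif_pos h]
    have hdrop : cs.drop i = cs[i] :: cs.drop (i+1) := List.drop_eq_getElem_cons h
    rcases hrest : cs.drop (i+1) with _ | ⟨r, rest⟩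
    · have ht : (cs.drop i).take 2 = [cs[i]] := by rw [hdrop, hrest]; rfl
      rw [ht] at h2 ⊢
      rw [if_neg h2, if_neg h3, ih, hrest, hdrop, hrest, pvScanA, pvScanA, if_neg h3]
    · have ht : (cs.drop i).take 2 = [cs[i], r] := by rw [hdrop, hrest]; rfl
      rw [ht] at h2 ⊢
      rw [if_neg h2, if_neg h3, ih, hrest, hdrop, hrest, pvScanA, if_neg h2, if_neg h3]
  | case4 i parts ops cur h =>
    rw [pvLoopA]
    have hnil : cs.drop i = [] := List.drop_eq_nil_of_le (by omega)
    rw [dif_neg h, hnil, pvScanA]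

-- dropping the character consumed by a single-char step preserves the absence of a
-- final lone '=' token (the side condition rules out the char completing '<=' or '>=')
theorem pvD_drop1 (c : Char) (s : List Char) (h : pvD (c :: s) = false)
    (hx : s = ['='] → c ≠ '<' ∧ c ≠ '>') : pvD s = false := by
  rcases s with _ | ⟨b, _ | ⟨c2, _ | ⟨d, rest⟩⟩⟩
  · rfl
  · by_cases hb : b = '='
    · subst hb
      rcases hx rfl with ⟨h1, h2⟩
      simp [pvD, h1, h2] at h
    · simp [pvD, hb]
  · by_cases hc2 : c2 = '='
    · subst hc2
      by_cases hb1 : b = '<'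
      · simp [pvD, hb1]
      · by_cases hb2 : b = '>'
        · simp [pvD, hb2]
        · simp [pvD, hb1, hb2] at h
    · simp [pvD, hc2]
  · simpa [pvD] using h

-- dropping the two characters of a two-char operator also preserves it
theorem pvD_drop2 (a b : Char) (s : List Char)
    (hop : (a = '<' ∧ b = '=') ∨ (a = '>' ∧ b = '=') ∨ (a = '<' ∧ b = '>'))
    (h : pvD (a :: b :: s) = false) : pvD s = false := by
  rcases s with _ | ⟨c2, _ | ⟨d, rest⟩⟩
  · rfl
  · rcases hop with ⟨h1, h2⟩ | ⟨h1, h2⟩ | ⟨h1, h2⟩ <;> subst h1 <;> subst h2 <;>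
      simp [pvD] at h ⊢ <;> tauto
  · rcases rest with _ | ⟨e, rest2⟩
    · rcases hop with ⟨h1, h2⟩ | ⟨h1, h2⟩ | ⟨h1, h2⟩ <;> subst h1 <;> subst h2 <;>
        simp [pvD] at h ⊢ <;> tauto
    · simpa [pvD] using h

-- main invariant: outside D_ the suffix scan of A and B's automaton agree from equal states
theorem scan_eq (n : Nat) : ∀ (s : List Char), s.length ≤ n →
    ∀ (parts ops : List String) (cur : String), pvD s = false →
    pvScanA s parts ops cur = pvFinishB (s.foldl pvStepB (parts, ops, cur, none)) := by
  induction n with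
  | zero =>
    intro s hlen parts ops cur _
    have : s = [] := List.eq_nil_of_length_eq_zero (by omega)
    subst this
    simp [pvScanA, pvFinishB]
  | succ n ih =>
    intro s hlen parts ops cur hD
    rcases s with _ | ⟨c, _ | ⟨r, rest⟩⟩
    · simp [pvScanA, pvFinishB]
    · -- one character left
      by_cases hc1 : c = '<'
      · subst hc1
        simp [pvScanA, pvOpKeys, pvStepB, pvHandleB, pvFinishB]
      · by_cases hc2 : c = '>'
        · subst hc2
          simp [pvScanA, pvOpKeys, pvStepB, pvHandleB, pvFinishB]
        · by_cases hc3 : c = '='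
          · subst hc3; simp [pvD] at hD
          · simp [pvScanA, pvOpKeys, pvStepB, pvHandleB, pvFinishB, hc1, hc2, hc3]
    · -- at least two characters
      by_cases hc1 : c = '<'
      · subst hc1
        by_cases hr1 : r = '='
        · subst hr1
          have hrec := ih rest (by simp at hlen ⊢; omega) (parts ++ [cur])
            (ops ++ [String.mk ['<', '=']]) ""
            (pvD_drop2 '<' '=' rest (by tauto) hD)
          simpa [pvScanA, pvOpKeys, pvStepB, pvHandleB] using hrec
        · by_cases hr2 : r = '>'
          · subst hr2
            have hrec := ih rest (by simp at hlen ⊢; omega) (parts ++ [cur])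
              (ops ++ ["!="]) ""
              (pvD_drop2 '<' '>' rest (by tauto) hD)
            simpa [pvScanA, pvOpKeys, pvStepB, pvHandleB] using hrec
          · -- lone '<' operator
            have hrec := ih (r :: rest) (by simp at hlen ⊢; omega) (parts ++ [cur])
              (ops ++ [String.mk ['<']]) ""
              (pvD_drop1 '<' (r :: rest) hD (by intro he; simp at he; exact absurd he.1 hr1))
            simpa [pvScanA, pvOpKeys, pvStepB, pvHandleB, hr1, hr2] using hrec
      · by_cases hc2 : c = '>'
        · subst hc2
          by_cases hr1 : r = '='
          · subst hr1
            have hrec := ih rest (by simp at hlen ⊢; omega) (parts ++ [cur])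
              (ops ++ [String.mk ['>', '=']]) ""
              (pvD_drop2 '>' '=' rest (by tauto) hD)
            simpa [pvScanA, pvOpKeys, pvStepB, pvHandleB] using hrec
          · -- lone '>' operator
            have hrec := ih (r :: rest) (by simp at hlen ⊢; omega) (parts ++ [cur])
              (ops ++ [String.mk ['>']]) ""
              (pvD_drop1 '>' (r :: rest) hD (by intro he; simp at he; exact absurd he.1 hr1))
            simpa [pvScanA, pvOpKeys, pvStepB, pvHandleB, hr1] using hrec
        · by_cases hc3 : c = '='
          · subst hc3
            have hrec := ih (r :: rest) (by simp at hlen ⊢; omega) (parts ++ [cur])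
              (ops ++ ["=="]) ""
              (pvD_drop1 '=' (r :: rest) hD (by intro he; simp))
            simpa [pvScanA, pvOpKeys, pvStepB, pvHandleB] using hrec
          · -- ordinary character
            have hrec := ih (r :: rest) (by simp at hlen ⊢; omega) parts ops (cur.push c)
              (pvD_drop1 c (r :: rest) hD (by intro he; exact ⟨hc1, hc2⟩))
            simpa [pvScanA, pvOpKeys, pvStepB, pvHandleB, hc1, hc2, hc3] using hrec

-- ===== VERDICT (by name: the statement is the Claim_ definition above) =====
theorem split_up_conditions_spec : Claim_unchanged_split_up_conditions := by
  intro condition _ hD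
  have h : pvD condition.toList = false := by
    cases hpv : pvD condition.toList with
    | false => rfl
    | true => exact absurd hpv hD
  calc split_up_conditions condition
      = pvScanA condition.toList [] [] "" := by
        simpa using pvLoopA_eq_scan condition.toList 0 [] [] ""
    _ = split_up_conditions_alt condition :=
        scan_eq condition.toList.length condition.toList le_rfl [] [] "" h

theorem split_up_conditions_changed : Claim_changed_split_up_conditions := by
  unfold Claim_changed_split_up_conditions
  refine ⟨by decide, by decide, ?_, by decide, by decide⟩
  show pvLoopA "a=".toList 0 [] [] "" = _
  rw [pvLoopA_eq_scan]
  decide
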